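-- pv_equiv track=rewrite | github.com/nreddy83/AI21-22 | Othello.py | possiblesboard
-- ===== SOURCE A (Python) =====
-- def possiblesboard(b, possibles):
--     possibles.sort()
--     board = ""
--     itr = 0
--     if len(possibles) > 0: pb = possibles[itr]
--     else: pb = -1
--     for i, ch in enumerate(b):
--         if pb == i:
--             board += "*"
--             if itr+1 < len(possibles):
--                 itr += 1
--                 pb = possibles[itr]
--         else: board += ch
--     return board
-- ===== SOURCE B (Python) =====
-- def possiblesboard(b, possibles):
--     possibles.sort()
--     # Build the result by splicing a '*' between slices of b at each successive
--     # position.  A '*' can only be spliced at a position at or after the write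
--     # cursor and on the board; since positions are sorted, the walk ends at the
--     # first position that is not.
--     pieces = []
--     i = 0
--     k = 0
--     while k < len(possibles) and i <= possibles[k] < len(b):
--         p = possibles[k]
--         pieces.append(b[i:p])
--         pieces.append('*')
--         i = p + 1
--         k += 1
--     pieces.append(b[i:])
--     return ''.join(pieces)
-- ===== Notes on version B (the rewrite author's own statement) =====
-- stated objective: alternative
-- what changed: Instead of scanning every character of b while merging against the sorted position list with a cursor, B builds the output from O(m) pieces: it walks the sorted positions with a write cursor, splicing the slice b[i:p] and a '*' for each position that is at/after the cursor and on the board, then appends the remainder b[i:].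
import Mathlib
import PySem

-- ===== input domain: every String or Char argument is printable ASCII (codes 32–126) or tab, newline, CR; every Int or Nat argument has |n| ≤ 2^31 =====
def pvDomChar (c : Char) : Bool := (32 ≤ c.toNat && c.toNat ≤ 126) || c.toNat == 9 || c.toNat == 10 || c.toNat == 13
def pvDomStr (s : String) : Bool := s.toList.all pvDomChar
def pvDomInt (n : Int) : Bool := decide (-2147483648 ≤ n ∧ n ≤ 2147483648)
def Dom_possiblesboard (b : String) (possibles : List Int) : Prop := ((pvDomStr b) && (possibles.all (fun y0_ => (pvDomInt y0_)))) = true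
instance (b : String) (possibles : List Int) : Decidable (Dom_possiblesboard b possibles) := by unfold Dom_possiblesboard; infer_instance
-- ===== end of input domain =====

-- B builds the result by splicing '*' between slices of b at the successive sorted positions
-- instead of A's per-character scan with a cursor into the position list; A's possibles.sort()
-- mutates its argument in place, the equivalence here is about the return value only.

-- ===== PORT A =====
def possiblesboard (b : String) (possibles : List Int) : String :=
  let s := PySem.List.sorted possibles (fun x => x) false
  let pb0 : Int := if 0 < s.length then s.getD 0 0 else -1
  let st := (PySem.List.enumerate b.toList 0).foldl
    (fun (st : List Char × Nat × Int) (ic : Int × Char) =>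
      if st.2.2 = ic.1 then
        if st.2.1 + 1 < s.length then (st.1 ++ ['*'], st.2.1 + 1, s.getD (st.2.1 + 1) 0)
        else (st.1 ++ ['*'], st.2.1, st.2.2)
      else (st.1 ++ [ic.2], st.2.1, st.2.2))
    (([] : List Char), 0, pb0)
  String.ofList st.1

-- ===== PORT B =====
-- Source B's while loop, transliterated: walk the sorted positions with the write cursor i,
-- emitting the slice b[i:p] and a '*' while the next position is at/after the cursor and
-- on the board, then emit the remainder b[i:]
def bLoop (bs : List Char) (n : Int) : List Int → Int → List Char
  | [], i => PySem.List.slice bs (some i) none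
  | p :: ps, i =>
      if i ≤ p ∧ p < n then
        PySem.List.slice bs (some i) (some p) ++ '*' :: bLoop bs n ps (p + 1)
      else PySem.List.slice bs (some i) none

def possiblesboard_alt (b : String) (possibles : List Int) : String :=
  let s := PySem.List.sorted possibles (fun x => x) false
  String.ofList (bLoop b.toList (b.toList.length : Int) s 0)

-- ===== PRECONDITION & SPEC =====
def Spec_possiblesboard (b : String) (possibles : List Int) (out : String) : Prop := out = possiblesboard_alt b possibles
instance (b : String) (possibles : List Int) (out : String) : Decidable (Spec_possiblesboard b possibles out) := by unfold Spec_possiblesboard; infer_instance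

-- ===== CLAIM (what is proved, stated in full; the proofs are below) =====
def Claim_equal_possiblesboard : Prop := ∀ (b : String) (possibles : List Int), Dom_possiblesboard b possibles → Spec_possiblesboard b possibles (possiblesboard b possibles)

-- ===== LEMMAS AND PROOFS =====

-- pure reference recursion for A's loop (accumulator removed)
def runA (s : List Int) : List Char → Int → Nat → Int → List Char
  | [], _, _, _ => []
  | c :: cs, i, itr, pb =>
      if pb = i then
        if itr + 1 < s.length then '*' :: runA s cs (i+1) (itr+1) (s.getD (itr+1) 0)
        else '*' :: runA s cs (i+1) itr pb
      else c :: runA s cs (i+1) itr pb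

-- intermediate scatter-write form of B's loop: mark each position in a copy of the board,
-- stopping where B's slice walk stops (position behind the cursor or off the board)
def altLoop (n : Nat) : List Int → List Char → Option Int → List Char
  | [], board, _ => board
  | p :: ps, board, prev =>
      if ¬(0 ≤ p ∧ p < (n : Int)) ∨ prev = some p then board
      else altLoop n ps (board.set p.toNat '*') (some p)

theorem foldA_eq_runA (s : List Int) : ∀ (cs : List Char) (k : Int) (acc : List Char) (itr : Nat) (pb : Int),
    ((PySem.List.enumerate cs k).foldl
      (fun (st : List Char × Nat × Int) (ic : Int × Char) =>
        if st.2.2 = ic.1 then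
          if st.2.1 + 1 < s.length then (st.1 ++ ['*'], st.2.1 + 1, s.getD (st.2.1 + 1) 0)
          else (st.1 ++ ['*'], st.2.1, st.2.2)
        else (st.1 ++ [ic.2], st.2.1, st.2.2))
      (acc, itr, pb)).1 = acc ++ runA s cs k itr pb := by
  intro cs
  induction cs with
  | nil => intro k acc itr pb; simp [PySem.List.enumerate_nil, runA]
  | cons c cs ih =>
    intro k acc itr pb
    rw [PySem.List.enumerate_cons]
    simp only [List.foldl_cons, runA]
    by_cases h : pb = k
    · by_cases h2 : itr + 1 < s.length
      · simpa [h, h2] using ih (k+1) (acc ++ ['*']) (itr+1) (s.getD (itr+1) 0)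
      · simpa [h, h2] using ih (k+1) (acc ++ ['*']) itr pb
    · simpa [h] using ih (k+1) (acc ++ [c]) itr pb

theorem runA_length (s : List Int) : ∀ (cs : List Char) (i : Int) (itr : Nat) (pb : Int),
    (runA s cs i itr pb).length = cs.length := by
  intro cs
  induction cs with
  | nil => intro i itr pb; simp [runA]
  | cons c cs ih =>
    intro i itr pb
    simp only [runA]
    split_ifs <;> simp [ih]

-- positions outside s are copied

theorem runA_copy_of_not_mem (s : List Int) : ∀ (cs : List Char) (i : Int) (itr : Nat) (pb : Int) (j : Nat),
    (pb ∈ s ∨ pb < i) → (i + j : Int) ∉ s →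
    (runA s cs i itr pb).getD j ' ' = cs.getD j ' ' := by
  intro cs
  induction cs with
  | nil => intro i itr pb j _ _; simp [runA]
  | cons c cs ih =>
    intro i itr pb j h hnot
    cases j with
    | zero =>
      have hpi : pb ≠ i := by
        rintro rfl
        rcases h with hmem | hlt
        · exact hnot (by simpa using hmem)
        · omega
      simp [runA, hpi]
    | succ j =>
      have hshift : (i + 1) + (j : Int) = i + ((j + 1 : Nat) : Int) := by push_cast; ring
      simp only [runA]
      by_cases hpi : pb = i
      · by_cases h2 : itr + 1 < s.length
        · simp only [if_pos hpi, if_pos h2, List.getD_cons_succ]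
          exact ih (i+1) (itr+1) (s.getD (itr+1) 0) j
            (Or.inl (by rw [List.getD_eq_getElem _ _ h2]; exact List.getElem_mem h2))
            (by rw [hshift]; exact hnot)
        · simp only [if_pos hpi, if_neg h2, List.getD_cons_succ]
          exact ih (i+1) itr pb j (Or.inr (by omega)) (by rw [hshift]; exact hnot)
      · simp only [if_neg hpi, List.getD_cons_succ]
        refine ih (i+1) itr pb j ?_ (by rw [hshift]; exact hnot)
        rcases h with hmem | hlt
        · exact Or.inl hmem
        · exact Or.inr (by omega)

theorem two_le_count_of_lt {s : List Int} {m1 m2 : Nat} (h12 : m1 < m2) (h2 : m2 < s.length)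
    (heq : s[m1] = s[m2]) : 2 ≤ s.count s[m2] := by
  induction s generalizing m1 m2 with
  | nil => simp at h2
  | cons a t ih =>
    cases m2 with
    | zero => omega
    | succ m2 =>
      have hm2 : m2 < t.length := by simpa using h2
      cases m1 with
      | zero =>
        have ha : a = t[m2]'hm2 := by simpa using heq
        have h1 : 1 ≤ t.count (t[m2]'hm2) := List.count_pos_iff.mpr (List.getElem_mem hm2)
        have hgoal : (a :: t)[m2+1]'h2 = t[m2]'hm2 := by simp
        rw [hgoal, List.count_cons]
        have hbeq : (a == t[m2]'hm2) = true := by rw [ha]; exact beq_self_eq_true _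
        rw [hbeq]
        simp only [if_true]
        omega
      | succ m1 =>
        have := ih (m1 := m1) (m2 := m2) (by omega) hm2 (by simpa using heq)
        simp only [List.getElem_cons_succ, List.count_cons]
        split_ifs <;> omega

-- the positive direction: an unblocked position of s does get marked

theorem runA_marks (s : List Int) (hsort : s.Pairwise (· ≤ ·)) :
    ∀ (cs : List Char) (i : Int) (itr : Nat) (pb : Int) (j : Nat),
    itr < s.length → pb = s.getD itr 0 → i ≤ pb → (∀ m < itr, s.getD m 0 < i) →
    j < cs.length → (i + j : Int) ∈ s →
    (∀ d ∈ s, 2 ≤ s.count d → (i + j : Int) ≤ d) →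
    (runA s cs i itr pb).getD j ' ' = '*' := by
  have hmono : ∀ (m m' : Nat), m ≤ m' → m' < s.length → s.getD m 0 ≤ s.getD m' 0 := by
    intro m m' hle hm'
    have hm : m < s.length := by omega
    rw [List.getD_eq_getElem _ _ hm, List.getD_eq_getElem _ _ hm']
    rcases Nat.lt_or_ge m m' with hlt | hge
    · exact (List.pairwise_iff_getElem.mp hsort) m m' hm hm' hlt
    · have : m = m' := by omega
      subst this; exact le_refl _
  intro cs
  induction cs with
  | nil => intro i itr pb j _ _ _ _ hj _ _; simp at hj
  | cons c cs ih =>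
    intro i itr pb j hitr hpb hile hlow hj hjs hnodup
    obtain ⟨m, hm, hms⟩ := List.mem_iff_getElem.mp hjs
    have hmitr : itr ≤ m := by
      by_contra hcon
      push_neg at hcon
      have h1 := hlow m hcon
      rw [List.getD_eq_getElem _ _ hm, hms] at h1
      have : (0 : Int) ≤ (j : Int) := Int.natCast_nonneg j
      omega
    have hsm : s.getD m 0 = i + (j : Int) := by rw [List.getD_eq_getElem _ _ hm, hms]
    cases j with
    | zero =>
      have hpi : pb = i := by
        have h1 : s.getD itr 0 ≤ s.getD m 0 := hmono itr m hmitr hm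
        simp only [Nat.cast_zero, add_zero] at hsm
        omega
      simp only [runA, if_pos hpi]
      split_ifs <;> simp
    | succ j =>
      have hshift : (i + 1) + (j : Int) = i + ((j + 1 : Nat) : Int) := by push_cast; ring
      have hij : i < i + ((j + 1 : Nat) : Int) := by push_cast; omega
      simp only [runA]
      by_cases hpi : pb = i
      · have hmgt : itr < m := by
          rcases Nat.lt_or_ge itr m with h' | h'
          · exact h'
          · exfalso
            have h1 : s.getD m 0 ≤ s.getD itr 0 := hmono m itr h' hitr
            omega
        have h2 : itr + 1 < s.length := by omega
        simp only [if_pos hpi, if_pos h2, List.getD_cons_succ]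
        have hnew : i + 1 ≤ s.getD (itr + 1) 0 := by
          have hge : s.getD itr 0 ≤ s.getD (itr + 1) 0 := hmono itr (itr + 1) (by omega) h2
          rcases lt_or_eq_of_le hge with hlt | heq
          · omega
          · exfalso
            have hdup : 2 ≤ s.count (s.getD (itr + 1) 0) := by
              rw [List.getD_eq_getElem _ _ h2]
              exact two_le_count_of_lt (m1 := itr) (m2 := itr + 1) (by omega) h2
                (by rw [← List.getD_eq_getElem _ _ hitr, ← List.getD_eq_getElem _ _ h2]; exact heq)
            have := hnodup _ (by rw [List.getD_eq_getElem _ _ h2]; exact List.getElem_mem h2) hdup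
            omega
        refine ih (i+1) (itr+1) (s.getD (itr+1) 0) j h2 rfl hnew ?_ (by simpa using hj)
          (by rw [hshift]; exact hjs) ?_
        · intro m' hm'
          have : s.getD m' 0 ≤ s.getD itr 0 := hmono m' itr (by omega) hitr
          omega
        · intro d hd hcd
          rw [hshift]; exact hnodup d hd hcd
      · have hile' : i + 1 ≤ pb := by
          rcases lt_or_eq_of_le hile with h' | h'
          · omega
          · exact absurd h'.symm hpi
        simp only [if_neg hpi, List.getD_cons_succ]
        refine ih (i+1) itr pb j hitr hpb hile' ?_ (by simpa using hj)
          (by rw [hshift]; exact hjs) ?_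
        · intro m' hm'
          have := hlow m' hm'
          omega
        · intro d hd hcd
          rw [hshift]; exact hnodup d hd hcd

theorem getD_set_eq (l : List Char) (i j : Nat) (a d : Char) :
    (l.set i a).getD j d = if i = j ∧ j < l.length then a else l.getD j d := by
  rcases Nat.lt_or_ge j l.length with hj | hj
  · have hj' : j < (l.set i a).length := by simpa using hj
    rw [List.getD_eq_getElem _ _ hj', List.getElem_set, List.getD_eq_getElem _ _ hj]
    by_cases h : i = j
    · rw [if_pos h, if_pos ⟨h, hj⟩]
    · rw [if_neg h, if_neg (by tauto)]
  · rw [List.getD_eq_default _ _ (by simpa using hj), List.getD_eq_default _ _ hj,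
      if_neg (fun h => by omega)]

-- A's loop never marks anything once the cursor value is below the running index
theorem runA_id (s : List Int) : ∀ (cs : List Char) (i : Int) (itr : Nat) (pb : Int),
    pb < i → runA s cs i itr pb = cs := by
  intro cs
  induction cs with
  | nil => intro i itr pb _; simp [runA]
  | cons c cs ih =>
    intro i itr pb h
    simp only [runA, if_neg (by omega : ¬ pb = i)]
    rw [ih (i+1) itr pb (by omega)]

theorem exists_two_idx_of_two_le_count (d : Int) : ∀ (s : List Int), 2 ≤ s.count d →
    ∃ i1 i2, i1 < i2 ∧ i2 < s.length ∧ s.getD i1 0 = d ∧ s.getD i2 0 = d := by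
  intro s
  induction s with
  | nil => intro h; simp at h
  | cons a t ih =>
    intro h
    rw [List.count_cons] at h
    by_cases ha : d = a
    · have h1 : 0 < t.count d := by
        rw [if_pos (by simp [ha])] at h; omega
      obtain ⟨m, hm, hmd⟩ := List.mem_iff_getElem.mp (List.count_pos_iff.mp h1)
      refine ⟨0, m + 1, by omega, by simpa using hm, by simpa using ha.symm, ?_⟩
      rw [List.getD_cons_succ, List.getD_eq_getElem t 0 hm]
      exact hmd
    · have h2 : 2 ≤ t.count d := by
        rw [if_neg (by simp only [beq_iff_eq]; exact fun h' => ha h'.symm)] at h; omega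
      obtain ⟨i1, i2, h12, hi2, hd1, hd2⟩ := ih h2
      exact ⟨i1 + 1, i2 + 1, by omega, by simpa using hi2, by simpa using hd1, by simpa using hd2⟩

-- with a duplicated value d at indices i1 < i2, no position beyond d is ever marked
theorem runA_no_dup_mark (s : List Int) (hsort : s.Pairwise (· ≤ ·)) (d : Int)
    (i1 i2 : Nat) (h12 : i1 < i2) (hi2 : i2 < s.length)
    (hd1 : s.getD i1 0 = d) (hd2 : s.getD i2 0 = d) :
    ∀ (cs : List Char) (i : Int) (itr : Nat) (pb : Int) (j : Nat),
    itr < s.length → pb = s.getD itr 0 → (itr < i2 ∨ (itr = i2 ∧ d < i)) →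
    d < i + (j : Int) →
    (runA s cs i itr pb).getD j ' ' = cs.getD j ' ' := by
  have hmono : ∀ (m m' : Nat), m ≤ m' → m' < s.length → s.getD m 0 ≤ s.getD m' 0 := by
    intro m m' hle hm'
    have hm : m < s.length := by omega
    rw [List.getD_eq_getElem _ _ hm, List.getD_eq_getElem _ _ hm']
    rcases Nat.lt_or_ge m m' with hlt | hge
    · exact (List.pairwise_iff_getElem.mp hsort) m m' hm hm' hlt
    · have : m = m' := by omega
      subst this; exact le_refl _
  intro cs
  induction cs with
  | nil => intro i itr pb j _ _ _ _; simp [runA]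
  | cons c cs ih =>
    intro i itr pb j hitr hpb hst htar
    have hpble : pb ≤ d := by
      rcases hst with hlt | ⟨heq, _⟩
      · have := hmono itr i2 (by omega) hi2
        omega
      · subst heq; omega
    cases j with
    | zero =>
      have hpi : pb ≠ i := by simp only [Nat.cast_zero, add_zero] at htar; omega
      simp [runA, hpi]
    | succ j =>
      have hshift : d < (i + 1) + (j : Int) := by push_cast at htar ⊢; omega
      simp only [runA]
      by_cases hpi : pb = i
      · have hlt2 : itr < i2 := by
          rcases hst with hlt | ⟨heq, hdi⟩
          · exact hlt
          · omega
        have hg : itr + 1 < s.length := by omega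
        simp only [if_pos hpi, if_pos hg, List.getD_cons_succ]
        refine ih (i+1) (itr+1) (s.getD (itr+1) 0) j hg rfl ?_ hshift
        rcases Nat.lt_or_ge (itr+1) i2 with h' | h'
        · exact Or.inl h'
        · have heq2 : itr + 1 = i2 := by omega
          refine Or.inr ⟨heq2, ?_⟩
          have hle1 : i1 ≤ itr := by omega
          have := hmono i1 itr hle1 hitr
          omega
      · simp only [if_neg hpi, List.getD_cons_succ]
        refine ih (i+1) itr pb j hitr hpb ?_ hshift
        rcases hst with hlt | ⟨heq, hdi⟩
        · exact Or.inl hlt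
        · exact Or.inr ⟨heq, by omega⟩

theorem altLoop_length (n : Nat) : ∀ (s : List Int) (board : List Char) (prev : Option Int),
    (altLoop n s board prev).length = board.length := by
  intro s
  induction s with
  | nil => intro board prev; simp [altLoop]
  | cons p ps ih =>
    intro board prev
    simp only [altLoop]
    split_ifs
    · rfl
    · rw [ih]; simp

theorem altLoop_star_or_copy (n : Nat) (j : Nat) : ∀ (s : List Int) (board : List Char) (prev : Option Int),
    (altLoop n s board prev).getD j ' ' = '*' ∨ (altLoop n s board prev).getD j ' ' = board.getD j ' ' := by
  intro s
  induction s with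
  | nil => intro board prev; right; rfl
  | cons p ps ih =>
    intro board prev
    simp only [altLoop]
    split_ifs
    · right; rfl
    · rcases ih (board.set p.toNat '*') (some p) with h | h
      · left; exact h
      · rw [h, getD_set_eq]
        split_ifs with hc
        · left; rfl
        · right; rfl

theorem altLoop_copy_of_not_mem (n : Nat) (j : Nat) : ∀ (s : List Int) (board : List Char) (prev : Option Int),
    (j : Int) ∉ s → (altLoop n s board prev).getD j ' ' = board.getD j ' ' := by
  intro s
  induction s with
  | nil => intro board prev _; rfl
  | cons p ps ih =>
    intro board prev hj
    simp only [altLoop]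
    split_ifs with hbrk
    · rfl
    · have hg : 0 ≤ p ∧ p < (n : Int) := by tauto
      rw [ih (board.set p.toNat '*') (some p) (fun h => hj (List.mem_cons_of_mem _ h)), getD_set_eq]
      rw [if_neg ?_]
      rintro ⟨hpj, _⟩
      exact hj (List.mem_cons.mpr (Or.inl (by omega)))

theorem altLoop_neg (n : Nat) (s : List Int) (board : List Char) (prev : Option Int)
    (hsort : s.Pairwise (· ≤ ·)) (hneg : ∃ x ∈ s, x < 0) :
    altLoop n s board prev = board := by
  obtain ⟨x, hx, hx0⟩ := hneg
  cases s with
  | nil => rfl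
  | cons p ps =>
    have hp : p ≤ x := by
      rcases List.mem_cons.mp hx with h | h
      · omega
      · exact (List.pairwise_cons.mp hsort).1 x h
    simp only [altLoop]
    rw [if_pos (Or.inl (by omega))]

theorem altLoop_stuck (n : Nat) (j : Nat) : ∀ (s : List Int) (board : List Char) (prev : Option Int),
    s.Pairwise (· ≤ ·) →
    (∀ q, prev = some q → ∀ x ∈ s, q ≤ x) →
    ((∃ d, 2 ≤ s.count d ∧ d < (j : Int)) ∨ (∃ q, prev = some q ∧ q ∈ s ∧ q < (j : Int))) →
    (altLoop n s board prev).getD j ' ' = board.getD j ' ' := by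
  intro s
  induction s with
  | nil => intro board prev _ _ _; rfl
  | cons p ps ih =>
    intro board prev hsort hord hst
    simp only [altLoop]
    split_ifs with hbrk
    · rfl
    · have hg : 0 ≤ p ∧ p < (n : Int) := by tauto
      have hne : prev ≠ some p := by tauto
      rcases hst with ⟨d, hcnt, hdj⟩ | ⟨q, hq, hqs, hqj⟩
      · have hdm : d ∈ p :: ps := List.count_pos_iff.mp (by omega)
        have hpd : p ≤ d := by
          rcases List.mem_cons.mp hdm with h | h
          · omega
          · exact (List.pairwise_cons.mp hsort).1 d h
        rw [ih (board.set p.toNat '*') (some p) (List.pairwise_cons.mp hsort).2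
            (by rintro q hq x hx; injection hq with hq; subst hq; exact (List.pairwise_cons.mp hsort).1 x hx) ?_]
        · rw [getD_set_eq, if_neg ?_]
          rintro ⟨hpj, _⟩
          omega
        · by_cases hpd2 : p = d
          · refine Or.inr ⟨p, rfl, ?_, by omega⟩
            have h1 : 1 ≤ ps.count d := by
              rw [List.count_cons, if_pos (by simp [hpd2])] at hcnt
              omega
            have h2 := List.count_pos_iff.mp (by omega : 0 < ps.count d)
            rwa [← hpd2] at h2
          · refine Or.inl ⟨d, ?_, hdj⟩
            rw [List.count_cons, if_neg (by simp only [beq_iff_eq]; omega)] at hcnt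
            omega
      · exfalso
        have hqp : q ≤ p := hord q hq p List.mem_cons_self
        rcases List.mem_cons.mp hqs with h | h
        · exact hne (h ▸ hq)
        · have hpq : p ≤ q := (List.pairwise_cons.mp hsort).1 q h
          have hqp2 : q = p := by omega
          exact hne (hqp2 ▸ hq)

theorem altLoop_marks (n : Nat) (j : Nat) : ∀ (s : List Int) (board : List Char) (prev : Option Int),
    s.Pairwise (· ≤ ·) → board.length = n →
    (prev = none ∨ ∃ q, prev = some q ∧ ∀ x ∈ s, q < x) →
    (j : Int) ∈ s → j < n → (∀ x ∈ s, 0 ≤ x) →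
    (∀ d, 2 ≤ s.count d → (j : Int) ≤ d) →
    (altLoop n s board prev).getD j ' ' = '*' := by
  intro s
  induction s with
  | nil => intro board prev _ _ _ hj; simp at hj
  | cons p ps ih =>
    intro board prev hsort hb hprev hjs hjn hpos hnodup
    have hpj : p ≤ (j : Int) := by
      rcases List.mem_cons.mp hjs with h | h
      · omega
      · exact (List.pairwise_cons.mp hsort).1 _ h
    have hg : 0 ≤ p ∧ p < (n : Int) := ⟨hpos p List.mem_cons_self, by omega⟩
    have hnobrk : prev ≠ some p := by
      rcases hprev with h | ⟨q, hq, hqlt⟩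
      · simp [h]
      · rw [hq]
        intro h'
        have h1 := hqlt p List.mem_cons_self
        have h2 : q = p := by injection h'
        omega
    simp only [altLoop]
    rw [if_neg (by tauto)]
    by_cases hpj2 : p = (j : Int)
    · have hset : (board.set p.toNat '*').getD j ' ' = '*' := by
        rw [getD_set_eq, if_pos ⟨by omega, by omega⟩]
      rcases altLoop_star_or_copy n j ps (board.set p.toNat '*') (some p) with h | h
      · exact h
      · rw [h, hset]
    · have hjps : (j : Int) ∈ ps := by
        rcases List.mem_cons.mp hjs with h | h
        · exact absurd h.symm hpj2
        · exact h
      refine ih (board.set p.toNat '*') (some p) (List.pairwise_cons.mp hsort).2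
        (by simp [hb]) (Or.inr ⟨p, rfl, ?_⟩) hjps hjn
        (fun x hx => hpos x (List.mem_cons_of_mem _ hx)) ?_
      · intro x hx
        have hle : p ≤ x := (List.pairwise_cons.mp hsort).1 x hx
        rcases lt_or_eq_of_le hle with h | h
        · exact h
        · exfalso
          have hcnt : 2 ≤ (p :: ps).count p := by
            rw [List.count_cons, if_pos (by simp)]
            have h1 : 0 < ps.count p := List.count_pos_iff.mpr (h ▸ hx)
            omega
          have := hnodup p hcnt
          omega
      · intro d hcnt
        refine hnodup d ?_
        rw [List.count_cons]
        split_ifs <;> omega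

-- bridge: B's slice-splicing walk equals the scatter-write form of the same walk
theorem bLoop_eq_altLoop (bs : List Char) (n : Nat) :
    ∀ (s : List Int) (i : Nat) (board : List Char) (prev : Option Int),
    s.Pairwise (· ≤ ·) →
    board.length = n → board.drop i = bs.drop i →
    ((prev = none ∧ i = 0) ∨ prev = some ((i : Int) - 1)) →
    (∀ q, prev = some q → ∀ p ∈ s, q ≤ p) →
    i ≤ n →
    altLoop n s board prev = board.take i ++ bLoop bs (n : Int) s (i : Int) := by
  intro s
  induction s with
  | nil =>
    intro i board prev _ hblen hdrop _ _ _
    simp only [altLoop, bLoop, PySem.List.slice_from_natCast, ← hdrop]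
    rw [List.take_append_drop]
  | cons p ps ih =>
    intro i board prev hsort hblen hdrop hprev hord hin
    have hcond : (¬(0 ≤ p ∧ p < (n : Int)) ∨ prev = some p) ↔ ¬((i : Int) ≤ p ∧ p < (n : Int)) := by
      rcases hprev with ⟨hpn, hi0⟩ | hps
      · subst hi0
        constructor
        · rintro (h | h)
          · intro hc; exact h ⟨by exact_mod_cast hc.1, hc.2⟩
          · rw [hpn] at h; cases h
        · intro h; left; intro hc; exact h ⟨by exact_mod_cast hc.1, hc.2⟩
      · have hqp : (i : Int) - 1 ≤ p := hord _ hps p List.mem_cons_self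
        constructor
        · rintro (h | h)
          · intro hc; exact h ⟨by omega, hc.2⟩
          · rw [hps] at h
            have : p = (i : Int) - 1 := by injection h with h'; omega
            intro hc; omega
        · intro h
          by_cases hp0 : 0 ≤ p ∧ p < (n : Int)
          · right
            have : p = (i : Int) - 1 := by
              by_contra hne
              exact h ⟨by omega, hp0.2⟩
            rw [hps, this]
          · left; exact hp0
    simp only [altLoop, bLoop]
    by_cases hc : (i : Int) ≤ p ∧ p < (n : Int)
    · rw [if_neg (by rw [hcond]; exact not_not_intro hc), if_pos hc]
      have hp0 : 0 ≤ p := by omega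
      set pn := p.toNat with hpn
      have hpeq : p = (pn : Int) := by omega
      have hipn : i ≤ pn := by omega
      have hpnn : pn < n := by omega
      have hset_len : (board.set pn '*').length = n := by simpa using hblen
      have hdrop' : (board.set pn '*').drop (pn + 1) = bs.drop (pn + 1) := by
        have h1 : (board.set pn '*').drop (pn + 1) = board.drop (pn + 1) := by
          apply List.ext_getElem
          · simp
          · intro k hk1 hk2
            simp only [List.getElem_drop, List.getElem_set]
            rw [if_neg (by omega)]
        have h2 : board.drop (pn + 1) = bs.drop (pn + 1) := by
          have h3 := congrArg (List.drop (pn + 1 - i)) hdrop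
          rw [List.drop_drop, List.drop_drop] at h3
          rw [(by omega : pn + 1 = i + (pn + 1 - i))]
          exact h3
        rw [h1, h2]
      have hrec := ih (pn + 1) (board.set pn '*') (some p)
        (List.pairwise_cons.mp hsort).2 hset_len hdrop'
        (Or.inr (by rw [hpeq]; congr 1; push_cast; ring))
        (by rintro q hq x hx; injection hq with hq; subst hq
            exact (List.pairwise_cons.mp hsort).1 x hx)
        (by omega)
      rw [hrec]
      have htake : (board.set pn '*').take (pn + 1) = board.take pn ++ ['*'] := by
        have hlt : pn < board.length := by omega
        rw [List.set_eq_take_cons_drop _ hlt, List.take_append]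
        have hlen_take : (board.take pn).length = pn := by simp; omega
        rw [hlen_take, (by omega : pn + 1 - pn = 1), List.take_take,
          (by omega : min (pn + 1) pn = pn)]
        simp
      have htake2 : board.take pn = board.take i ++ (bs.drop i).take (pn - i) := by
        have : pn = i + (pn - i) := by omega
        rw [this, List.take_add, hdrop]
        congr 2
        omega
      have hslice : PySem.List.slice bs (some (i : Int)) (some p) = (bs.drop i).take (pn - i) := by
        rw [hpeq, PySem.List.slice_natCast]
      rw [htake, htake2, hslice, hpeq]
      have hcast : ((pn : Int) + 1) = ((pn + 1 : Nat) : Int) := by push_cast; ring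
      rw [hcast]
      simp
    · rw [if_pos (by rw [hcond]; exact hc), if_neg hc]
      simp only [PySem.List.slice_from_natCast, ← hdrop]
      rw [List.take_append_drop]

-- ===== VERDICT (by name: the statement is the Claim_ definition above) =====
theorem possiblesboard_spec : Claim_equal_possiblesboard := by
  intro b possibles _
  show possiblesboard b possibles = possiblesboard_alt b possibles
  simp only [possiblesboard, possiblesboard_alt]
  set cs := b.toList with hcs
  set s := PySem.List.sorted possibles (fun x => x) false with hs
  set n := cs.length with hn
  set pb0 : Int := if 0 < s.length then s.getD 0 0 else -1 with hpb0
  have hsort : s.Pairwise (· ≤ ·) := PySem.List.sorted_pairwise possibles (fun x => x)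
  have hbridge : bLoop cs (n : Int) s 0 = altLoop n s cs none := by
    have := bLoop_eq_altLoop cs n s 0 cs none hsort rfl rfl (Or.inl ⟨rfl, rfl⟩)
      (by rintro q hq; cases hq) (by omega)
    simp only [Nat.cast_zero, List.take_zero, List.nil_append] at this
    exact this.symm
  rw [hbridge]
  refine congrArg String.ofList ?_
  rw [foldA_eq_runA s cs 0 [] 0 pb0, List.nil_append]
  apply List.ext_getElem
  · rw [runA_length, altLoop_length]
  · intro j hj1 hj2
    have hjn : j < n := by simpa [runA_length] using hj1
    rw [← List.getD_eq_getElem _ (' ') hj1, ← List.getD_eq_getElem _ (' ') hj2]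
    by_cases hjs : (j : Int) ∈ s
    · have hlen : 0 < s.length := List.length_pos_of_mem hjs
      have hpb0' : pb0 = s.getD 0 0 := by rw [hpb0, if_pos hlen]
      by_cases hneg : ∃ x ∈ s, x < 0
      · -- a negative entry: neither side marks anything
        obtain ⟨x, hx, hx0⟩ := hneg
        obtain ⟨m, hm, hmx⟩ := List.mem_iff_getElem.mp hx
        have hhead : s.getD 0 0 ≤ x := by
          rcases Nat.eq_zero_or_pos m with h0 | hposm
          · subst h0
            rw [List.getD_eq_getElem _ _ hlen, hmx]
          · rw [List.getD_eq_getElem _ _ hlen, ← hmx]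
            exact (List.pairwise_iff_getElem.mp hsort) 0 m hlen hm hposm
        have hpbneg : pb0 < 0 := by rw [hpb0']; omega
        rw [runA_id s cs 0 0 pb0 (by omega),
          altLoop_neg n s cs none hsort ⟨x, hx, hx0⟩]
      · by_cases hdup : ∃ d, 2 ≤ s.count d ∧ d < (j : Int)
        · -- a duplicated entry below j: the cursor sticks before j on both sides
          obtain ⟨d, hcnt, hdj⟩ := hdup
          obtain ⟨i1, i2, h12, hi2, hd1, hd2⟩ := exists_two_idx_of_two_le_count d s hcnt
          rw [runA_no_dup_mark s hsort d i1 i2 h12 hi2 hd1 hd2 cs 0 0 pb0 j hlen hpb0'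
              (Or.inl (by omega)) (by omega),
            altLoop_stuck n j s cs none hsort (by rintro q h; cases h)
              (Or.inl ⟨d, hcnt, hdj⟩)]
        · -- the clean case: both sides mark j
          push_neg at hneg hdup
          have hnd : ∀ d, 2 ≤ s.count d → (j : Int) ≤ d := by
            intro d hc
            have := hdup d hc
            omega
          rw [runA_marks s hsort cs 0 0 pb0 j hlen hpb0' ?_ (by omega) hjn
              (by simpa using hjs) (by intro d hd hc; simpa using hnd d hc),
            altLoop_marks n j s cs none hsort rfl (Or.inl rfl) hjs hjn hneg hnd]
          rw [hpb0']
          refine hneg _ ?_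
          rw [List.getD_eq_getElem _ _ hlen]
          exact List.getElem_mem hlen
    · rw [runA_copy_of_not_mem s cs 0 0 pb0 j ?_ (by simpa using hjs),
        altLoop_copy_of_not_mem n j s cs none hjs]
      rcases Nat.eq_zero_or_pos s.length with h0 | hposs
      · right; rw [hpb0, if_neg (by omega)]; omega
      · left; rw [hpb0, if_pos hposs, List.getD_eq_getElem _ _ hposs]; exact List.getElem_mem hposs
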